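-- pv_equiv track=rewrite | github.com/anwitac246/github-to-docs | github_docs.py | _determine_module_role
-- ===== SOURCE A (Python) =====
-- from typing import List, Dict, Any, Optional, Set
--
-- def _determine_module_role(module_name: str, module_data: Dict[str, Any]) -> str:
--     """Determine the architectural role of a module"""
--     name_lower = module_name.lower()
--
--     if any(pattern in name_lower for pattern in ["frontend", "ui", "client"]):
--         return "User Interface Layer"
--     elif any(pattern in name_lower for pattern in ["backend", "api", "server"]):
--         return "Business Logic Layer"
--     elif any(pattern in name_lower for pattern in ["data", "model", "db"]):
--         return "Data Access Layer"
--     elif any(pattern in name_lower for pattern in ["config", "deploy", "script"]):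
--         return "Infrastructure Layer"
--     else:
--         return "Core Application Logic"
-- ===== SOURCE B (Python) =====
-- # Different algorithm: instead of per-group substring-membership tests, sweep the
-- # lowered name position by position once, tracking the minimum priority of any
-- # pattern that starts at the current position; index a role table at the end.
-- _ROLES = ["User Interface Layer", "Business Logic Layer",
--           "Data Access Layer", "Infrastructure Layer"]
-- _PRIORITY = [("frontend", 0), ("ui", 0), ("client", 0),
--              ("backend", 1), ("api", 1), ("server", 1),
--              ("data", 2), ("model", 2), ("db", 2),
--              ("config", 3), ("deploy", 3), ("script", 3)]
--
-- def _determine_module_role(module_name, module_data):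
--     s = module_name.lower()
--     best = 4
--     for i in range(len(s)):
--         for pat, pri in _PRIORITY:
--             if pri < best and s.startswith(pat, i):
--                 best = pri
--     return _ROLES[best] if best < 4 else "Core Application Logic"
-- ===== Notes on version B (the rewrite author's own statement) =====
-- stated objective: alternative
-- what changed: Replaces the ordered if/elif chain of whole-string substring-membership tests with a single positional sweep of the lowered name that keeps a minimum-priority accumulator over patterns starting at each position, then indexes a role table.
import Mathlib
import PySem

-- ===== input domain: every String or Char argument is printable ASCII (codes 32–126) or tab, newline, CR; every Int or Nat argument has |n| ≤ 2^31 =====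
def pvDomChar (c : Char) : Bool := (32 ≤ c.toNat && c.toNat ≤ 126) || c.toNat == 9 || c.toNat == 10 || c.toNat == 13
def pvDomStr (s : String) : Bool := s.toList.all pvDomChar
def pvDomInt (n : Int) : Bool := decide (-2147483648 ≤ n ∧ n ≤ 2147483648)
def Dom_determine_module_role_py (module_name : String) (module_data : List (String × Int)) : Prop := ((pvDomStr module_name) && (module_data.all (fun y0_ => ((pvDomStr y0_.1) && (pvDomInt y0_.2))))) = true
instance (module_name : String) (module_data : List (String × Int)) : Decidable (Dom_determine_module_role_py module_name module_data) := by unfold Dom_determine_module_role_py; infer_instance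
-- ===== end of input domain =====

-- B replaces A's if/elif chain of substring-membership tests with a single positional sweep keeping a min-priority accumulator, then a table index (alternative algorithm, same cost).


-- ===== PORT A =====
def determine_module_role_py (module_name : String) (module_data : List (String × Int)) : String :=
  let name_lower := PySem.Str.lower module_name
  if ["frontend", "ui", "client"].any (fun pattern => PySem.Str.isIn pattern name_lower) then
    "User Interface Layer"
  else if ["backend", "api", "server"].any (fun pattern => PySem.Str.isIn pattern name_lower) then
    "Business Logic Layer"
  else if ["data", "model", "db"].any (fun pattern => PySem.Str.isIn pattern name_lower) then
    "Data Access Layer"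
  else if ["config", "deploy", "script"].any (fun pattern => PySem.Str.isIn pattern name_lower) then
    "Infrastructure Layer"
  else
    "Core Application Logic"

-- ===== PORT B =====
def pvRoles : List String :=
  ["User Interface Layer", "Business Logic Layer", "Data Access Layer", "Infrastructure Layer"]

def pvPriority : List (List Char × Nat) :=
  [("frontend".toList, 0), ("ui".toList, 0), ("client".toList, 0),
   ("backend".toList, 1), ("api".toList, 1), ("server".toList, 1),
   ("data".toList, 2), ("model".toList, 2), ("db".toList, 2),
   ("config".toList, 3), ("deploy".toList, 3), ("script".toList, 3)]

-- Python's s.startswith(pat, i) with 0 ≤ i is exactly List.isPrefixOf pat (s.drop i).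
def determine_module_role_py_alt (module_name : String) (module_data : List (String × Int)) : String :=
  let s := (PySem.Str.lower module_name).toList
  let best : Nat := (List.range s.length).foldl
    (fun b i => pvPriority.foldl
      (fun b pr => if pr.2 < b ∧ pr.1.isPrefixOf (s.drop i) = true then pr.2 else b) b) 4
  if best < 4 then (PySem.List.pyGet? pvRoles (best : Int)).getD "Core Application Logic"
  else "Core Application Logic"

-- ===== PRECONDITION & SPEC =====
def Spec_determine_module_role_py (module_name : String) (module_data : List (String × Int)) (out : String) : Prop := out = determine_module_role_py_alt module_name module_data
instance (module_name : String) (module_data : List (String × Int)) (out : String) : Decidable (Spec_determine_module_role_py module_name module_data out) := by unfold Spec_determine_module_role_py; infer_instance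

-- ===== CLAIM =====
def Claim_equal_determine_module_role_py : Prop := ∀ (module_name : String) (module_data : List (String × Int)), Dom_determine_module_role_py module_name module_data → Spec_determine_module_role_py module_name module_data (determine_module_role_py module_name module_data)

-- ===== LEMMAS AND PROOFS =====

-- Facts about a fold keeping the minimum f-value among elements satisfying Q: the result
-- never exceeds the start, lower-bounds every matched f-value, and is the start or a matched f-value.
theorem pvMinScan {α : Type} (f : α → Nat) (Q : α → Bool) :
    ∀ (xs : List α) (b : Nat),
      xs.foldl (fun acc x => if f x < acc ∧ Q x = true then f x else acc) b ≤ b ∧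
      (∀ x ∈ xs, Q x = true →
        xs.foldl (fun acc x => if f x < acc ∧ Q x = true then f x else acc) b ≤ f x) ∧
      (xs.foldl (fun acc x => if f x < acc ∧ Q x = true then f x else acc) b = b ∨
        ∃ x ∈ xs, Q x = true ∧
          xs.foldl (fun acc x => if f x < acc ∧ Q x = true then f x else acc) b = f x) := by
  intro xs
  induction xs with
  | nil => intro b; exact ⟨le_refl _, fun x hx => absurd hx (List.not_mem_nil), Or.inl rfl⟩
  | cons y ys ih =>
    intro b
    simp only [List.foldl_cons]
    by_cases hc : f y < b ∧ Q y = true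
    · rw [if_pos hc]
      obtain ⟨h1, h2, h3⟩ := ih (f y)
      refine ⟨le_trans h1 (le_of_lt hc.1), ?_, ?_⟩
      · intro x hx hQ
        rcases List.mem_cons.mp hx with rfl | hmem
        · exact h1
        · exact h2 x hmem hQ
      · rcases h3 with h | ⟨x, hx, hQ, hval⟩
        · exact Or.inr ⟨y, List.mem_cons_self, hc.2, h⟩
        · exact Or.inr ⟨x, List.mem_cons_of_mem _ hx, hQ, hval⟩
    · rw [if_neg hc]
      obtain ⟨h1, h2, h3⟩ := ih b
      refine ⟨h1, ?_, ?_⟩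
      · intro x hx hQ
        rcases List.mem_cons.mp hx with rfl | hmem
        · have hbf : b ≤ f x := by
            by_contra hlt
            exact hc ⟨by omega, hQ⟩
          exact le_trans h1 hbf
        · exact h2 x hmem hQ
      · rcases h3 with h | ⟨x, hx, hQ, hval⟩
        · exact Or.inl h
        · exact Or.inr ⟨x, List.mem_cons_of_mem _ hx, hQ, hval⟩

-- The four group conditions over the lowered character list.
def pvC0 (s : List Char) : Bool := PySem.Chars.isIn "frontend".toList s || PySem.Chars.isIn "ui".toList s || PySem.Chars.isIn "client".toList s
def pvC1 (s : List Char) : Bool := PySem.Chars.isIn "backend".toList s || PySem.Chars.isIn "api".toList s || PySem.Chars.isIn "server".toList s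
def pvC2 (s : List Char) : Bool := PySem.Chars.isIn "data".toList s || PySem.Chars.isIn "model".toList s || PySem.Chars.isIn "db".toList s
def pvC3 (s : List Char) : Bool := PySem.Chars.isIn "config".toList s || PySem.Chars.isIn "deploy".toList s || PySem.Chars.isIn "script".toList s

def pvBest (s : List Char) : Nat :=
  (List.range s.length).foldl
    (fun b i => pvPriority.foldl
      (fun b pr => if pr.2 < b ∧ pr.1.isPrefixOf (s.drop i) = true then pr.2 else b) b) 4

def pvPairs (s : List Char) : List (Nat × (List Char × Nat)) :=
  (List.range s.length).flatMap (fun i => pvPriority.map (fun pr => (i, pr)))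

theorem pvBest_flat (s : List Char) :
    pvBest s = (pvPairs s).foldl
      (fun acc x => if x.2.2 < acc ∧ x.2.1.isPrefixOf (s.drop x.1) = true then x.2.2 else acc) 4 := by
  rw [pvBest, pvPairs, List.foldl_flatMap]
  simp only [List.foldl_map]

-- a prefix match at any position yields a substring occurrence
theorem pvBounded_isIn (pat s : List Char) (i : Nat)
    (hp : pat.isPrefixOf (s.drop i) = true) : PySem.Chars.isIn pat s = true :=
  (PySem.Chars.exists_prefix_drop_iff_isIn pat s).mp ⟨i, List.isPrefixOf_iff_prefix.mp hp⟩

-- a substring occurrence of a nonempty pattern yields a prefix match at some position < length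
theorem pvIsIn_bounded (pat s : List Char) (hne : pat ≠ [])
    (hin : PySem.Chars.isIn pat s = true) :
    ∃ i, i < s.length ∧ pat.isPrefixOf (s.drop i) = true := by
  obtain ⟨j, hj⟩ := (PySem.Chars.exists_prefix_drop_iff_isIn pat s).mpr hin
  by_cases hjl : j < s.length
  · exact ⟨j, hjl, List.isPrefixOf_iff_prefix.mpr hj⟩
  · exfalso
    have hnil : s.drop j = [] := List.drop_eq_nil_of_le (by omega)
    rw [hnil] at hj
    exact hne (List.prefix_nil.mp hj)

-- matched pairs correspond exactly to the group conditions
theorem pvMatched_cases (s : List Char) (x : Nat × (List Char × Nat))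
    (hx : x ∈ pvPairs s) (hQ : x.2.1.isPrefixOf (s.drop x.1) = true) :
    (x.2.2 = 0 ∧ pvC0 s = true) ∨ (x.2.2 = 1 ∧ pvC1 s = true) ∨
    (x.2.2 = 2 ∧ pvC2 s = true) ∨ (x.2.2 = 3 ∧ pvC3 s = true) := by
  rw [pvPairs] at hx
  simp only [List.mem_flatMap, List.mem_map, List.mem_range] at hx
  obtain ⟨i, hi, pr, hpr, hEq⟩ := hx
  subst hEq
  have hin : PySem.Chars.isIn pr.1 s = true := pvBounded_isIn pr.1 s i hQ
  simp only [pvPriority, List.mem_cons, List.not_mem_nil, or_false] at hpr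
  rcases hpr with rfl | rfl | rfl | rfl | rfl | rfl | rfl | rfl | rfl | rfl | rfl | rfl
  · exact Or.inl ⟨rfl, by simp only [pvC0]; rw [hin]; rfl⟩
  · exact Or.inl ⟨rfl, by simp only [pvC0]; rw [hin]; simp⟩
  · exact Or.inl ⟨rfl, by simp only [pvC0]; rw [hin]; simp⟩
  · exact Or.inr (Or.inl ⟨rfl, by simp only [pvC1]; rw [hin]; rfl⟩)
  · exact Or.inr (Or.inl ⟨rfl, by simp only [pvC1]; rw [hin]; simp⟩)
  · exact Or.inr (Or.inl ⟨rfl, by simp only [pvC1]; rw [hin]; simp⟩)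
  · exact Or.inr (Or.inr (Or.inl ⟨rfl, by simp only [pvC2]; rw [hin]; rfl⟩))
  · exact Or.inr (Or.inr (Or.inl ⟨rfl, by simp only [pvC2]; rw [hin]; simp⟩))
  · exact Or.inr (Or.inr (Or.inl ⟨rfl, by simp only [pvC2]; rw [hin]; simp⟩))
  · exact Or.inr (Or.inr (Or.inr ⟨rfl, by simp only [pvC3]; rw [hin]; rfl⟩))
  · exact Or.inr (Or.inr (Or.inr ⟨rfl, by simp only [pvC3]; rw [hin]; simp⟩))
  · exact Or.inr (Or.inr (Or.inr ⟨rfl, by simp only [pvC3]; rw [hin]; simp⟩))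

-- for each group condition, a matched pair of that priority exists
theorem pvCond_matched (s : List Char) (k : Nat)
    (h : (k = 0 ∧ pvC0 s = true) ∨ (k = 1 ∧ pvC1 s = true) ∨
         (k = 2 ∧ pvC2 s = true) ∨ (k = 3 ∧ pvC3 s = true)) :
    ∃ x ∈ pvPairs s, x.2.1.isPrefixOf (s.drop x.1) = true ∧ x.2.2 = k := by
  have mk : ∀ (pat : List Char), pat ≠ [] → (pat, k) ∈ pvPriority →
      PySem.Chars.isIn pat s = true →
      ∃ x ∈ pvPairs s, x.2.1.isPrefixOf (s.drop x.1) = true ∧ x.2.2 = k := by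
    intro pat hne hmem hin
    obtain ⟨i, hi, hp⟩ := pvIsIn_bounded pat s hne hin
    refine ⟨(i, (pat, k)), ?_, hp, rfl⟩
    rw [pvPairs]
    simp only [List.mem_flatMap, List.mem_map, List.mem_range]
    exact ⟨i, hi, (pat, k), hmem, rfl⟩
  rcases h with ⟨rfl, h⟩ | ⟨rfl, h⟩ | ⟨rfl, h⟩ | ⟨rfl, h⟩ <;>
    [ simp only [pvC0, Bool.or_eq_true] at h;
      simp only [pvC1, Bool.or_eq_true] at h;
      simp only [pvC2, Bool.or_eq_true] at h;
      simp only [pvC3, Bool.or_eq_true] at h ] <;>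
    rcases h with (h | h) | h <;>
    exact mk _ (by decide) (by decide) h

theorem pvBest_eq (s : List Char) :
    pvBest s = (if pvC0 s = true then 0 else if pvC1 s = true then 1
                else if pvC2 s = true then 2 else if pvC3 s = true then 3 else 4) := by
  rw [pvBest_flat]
  obtain ⟨hle, hlb, hach⟩ :=
    pvMinScan (fun x : Nat × (List Char × Nat) => x.2.2)
      (fun x => x.2.1.isPrefixOf (s.drop x.1)) (pvPairs s) 4
  set B := (pvPairs s).foldl
      (fun acc x => if x.2.2 < acc ∧ x.2.1.isPrefixOf (s.drop x.1) = true then x.2.2 else acc) 4 with hB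
  have hub : ∀ k, ((k = 0 ∧ pvC0 s = true) ∨ (k = 1 ∧ pvC1 s = true) ∨
      (k = 2 ∧ pvC2 s = true) ∨ (k = 3 ∧ pvC3 s = true)) → B ≤ k := by
    intro k hk
    obtain ⟨x, hx, hQ, hv⟩ := pvCond_matched s k hk
    have := hlb x hx hQ
    omega
  have hcase : B = 4 ∨ (B = 0 ∧ pvC0 s = true) ∨ (B = 1 ∧ pvC1 s = true) ∨
      (B = 2 ∧ pvC2 s = true) ∨ (B = 3 ∧ pvC3 s = true) := by
    rcases hach with h | ⟨x, hx, hQ, hv⟩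
    · exact Or.inl h
    · rcases pvMatched_cases s x hx hQ with ⟨h1, h2⟩ | ⟨h1, h2⟩ | ⟨h1, h2⟩ | ⟨h1, h2⟩
      · exact Or.inr (Or.inl ⟨by omega, h2⟩)
      · exact Or.inr (Or.inr (Or.inl ⟨by omega, h2⟩))
      · exact Or.inr (Or.inr (Or.inr (Or.inl ⟨by omega, h2⟩)))
      · exact Or.inr (Or.inr (Or.inr (Or.inr ⟨by omega, h2⟩)))
  split_ifs with h0 h1 h2 h3
  · have := hub 0 (Or.inl ⟨rfl, h0⟩); omega
  · have := hub 1 (Or.inr (Or.inl ⟨rfl, h1⟩))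
    rcases hcase with h | ⟨hb, hc⟩ | ⟨hb, _⟩ | ⟨hb, _⟩ | ⟨hb, _⟩ <;> first | omega | exact absurd hc h0
  · have := hub 2 (Or.inr (Or.inr (Or.inl ⟨rfl, h2⟩)))
    rcases hcase with h | ⟨hb, hc⟩ | ⟨hb, hc⟩ | ⟨hb, _⟩ | ⟨hb, _⟩ <;>
      first | omega | exact absurd hc h0 | exact absurd hc h1
  · have := hub 3 (Or.inr (Or.inr (Or.inr ⟨rfl, h3⟩)))
    rcases hcase with h | ⟨hb, hc⟩ | ⟨hb, hc⟩ | ⟨hb, hc⟩ | ⟨hb, _⟩ <;>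
      first | omega | exact absurd hc h0 | exact absurd hc h1 | exact absurd hc h2
  · rcases hcase with h | ⟨hb, hc⟩ | ⟨hb, hc⟩ | ⟨hb, hc⟩ | ⟨hb, hc⟩ <;>
      first | omega | exact absurd hc h0 | exact absurd hc h1 | exact absurd hc h2 | exact absurd hc h3

theorem pvAny_iff0 (nl : String) :
    (["frontend", "ui", "client"].any (fun pattern => PySem.Str.isIn pattern nl)) = pvC0 nl.toList := by
  simp only [List.any_cons, List.any_nil, Bool.or_false, pvC0, PySem.Str.isIn_eq]
  rw [Bool.or_assoc]
theorem pvAny_iff1 (nl : String) :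
    (["backend", "api", "server"].any (fun pattern => PySem.Str.isIn pattern nl)) = pvC1 nl.toList := by
  simp only [List.any_cons, List.any_nil, Bool.or_false, pvC1, PySem.Str.isIn_eq]
  rw [Bool.or_assoc]
theorem pvAny_iff2 (nl : String) :
    (["data", "model", "db"].any (fun pattern => PySem.Str.isIn pattern nl)) = pvC2 nl.toList := by
  simp only [List.any_cons, List.any_nil, Bool.or_false, pvC2, PySem.Str.isIn_eq]
  rw [Bool.or_assoc]
theorem pvAny_iff3 (nl : String) :
    (["config", "deploy", "script"].any (fun pattern => PySem.Str.isIn pattern nl)) = pvC3 nl.toList := by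
  simp only [List.any_cons, List.any_nil, Bool.or_false, pvC3, PySem.Str.isIn_eq]
  rw [Bool.or_assoc]

-- ===== VERDICT =====
theorem determine_module_role_py_spec : Claim_equal_determine_module_role_py := by
  intro module_name module_data _
  unfold Spec_determine_module_role_py determine_module_role_py determine_module_role_py_alt
  set nl := PySem.Str.lower module_name with hnl
  have hbest : (List.range nl.toList.length).foldl
      (fun b i => pvPriority.foldl
        (fun b pr => if pr.2 < b ∧ pr.1.isPrefixOf (nl.toList.drop i) = true then pr.2 else b) b) 4
      = pvBest nl.toList := rfl
  simp only [hbest, pvBest_eq, pvAny_iff0, pvAny_iff1, pvAny_iff2, pvAny_iff3]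
  by_cases h0 : pvC0 nl.toList = true
  · rw [if_pos h0, if_pos h0]; rfl
  · rw [if_neg h0, if_neg h0]
    by_cases h1 : pvC1 nl.toList = true
    · rw [if_pos h1, if_pos h1]; rfl
    · rw [if_neg h1, if_neg h1]
      by_cases h2 : pvC2 nl.toList = true
      · rw [if_pos h2, if_pos h2]; rfl
      · rw [if_neg h2, if_neg h2]
        by_cases h3 : pvC3 nl.toList = true
        · rw [if_pos h3, if_pos h3]; rfl
        · rw [if_neg h3, if_neg h3]; rfl
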